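-- pv_equiv track=rewrite | github.com/LukasSales/Projeto_PIBIC | Gerador_histograma.py | encontrar_exclusoes_minimas
-- ===== SOURCE A (Python) =====
-- def construir_histograma_excluir(string):
--     histograma = {}
--     for char in string:
--         if char in histograma:
--             histograma[char] += 1
--         else:
--             histograma[char] = 1
--     return histograma
--
-- def encontrar_exclusoes_minimas(string1, string2, str_excluida):
--     string_final = "" #string criada para ser adicionada nela os caracteres que são iguais as duas palavras
--     histograma1 = construir_histograma_excluir(string1)
--     histograma2 = construir_histograma_excluir(string2)
--
--     exclusoes_minimas = 0
--
--     # Percorre cada caractere no histograma1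
--     for char, count in histograma1.items():
--         if char in histograma2:
--             if (count != histograma2[char]):
--                 exclusoes_minimas += abs(count - histograma2[char])
--                 str_excluida.update({char:count- histograma2[char]})
--                 string_final += char * min(histograma1[char],histograma2[char])
--
--             else:
--                 string_final += char * abs(count)
--
--
--         else:
--
--             str_excluida.update({char:count})
--             exclusoes_minimas += count
--
--     # Percorre cada caractere no histograma2 para verificar se há caracteres extras
--     for char, count in histograma2.items():
--         if char not in histograma1:
--             exclusoes_minimas += count
--             str_excluida.update({char:count})
--
--     histograma_resultado = construir_histograma_excluir(string_final)
--
--     return exclusoes_minimas, str_excluida, histograma1, histograma2, histograma_resultado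
-- ===== SOURCE B (Python) =====
-- def encontrar_exclusoes_minimas(string1, string2, str_excluida):
--     # B: one pass over the union of histogram keys, computing the deletion count,
--     # str_excluida updates and histograma_resultado arithmetically -- no string_final
--     # is built and no third histogram pass is run. Mutates str_excluida like A.
--     histograma1 = {}
--     for char in string1:
--         histograma1[char] = histograma1.get(char, 0) + 1
--     histograma2 = {}
--     for char in string2:
--         histograma2[char] = histograma2.get(char, 0) + 1
--
--     exclusoes_minimas = 0
--     histograma_resultado = {}
--     for char in list(histograma1) + [c for c in histograma2 if c not in histograma1]:
--         c1 = histograma1.get(char, 0)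
--         c2 = histograma2.get(char, 0)
--         exclusoes_minimas += abs(c1 - c2)
--         if c1 and c2:
--             histograma_resultado[char] = min(c1, c2)
--             if c1 != c2:
--                 str_excluida[char] = c1 - c2
--         else:
--             str_excluida[char] = c1 + c2
--
--     return exclusoes_minimas, str_excluida, histograma1, histograma2, histograma_resultado
-- ===== Notes on version B (the rewrite author's own statement) =====
-- stated objective: simpler
-- what changed: A runs two separate passes over the histograms, builds an intermediate string of the shared characters and re-histograms that string in a third pass; B does a single arithmetic pass over the union of the histogram keys, computing the deletion count, the str_excluida updates and histograma_resultado directly from the two counts, with no intermediate string and no third histogram pass.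
import Mathlib
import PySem

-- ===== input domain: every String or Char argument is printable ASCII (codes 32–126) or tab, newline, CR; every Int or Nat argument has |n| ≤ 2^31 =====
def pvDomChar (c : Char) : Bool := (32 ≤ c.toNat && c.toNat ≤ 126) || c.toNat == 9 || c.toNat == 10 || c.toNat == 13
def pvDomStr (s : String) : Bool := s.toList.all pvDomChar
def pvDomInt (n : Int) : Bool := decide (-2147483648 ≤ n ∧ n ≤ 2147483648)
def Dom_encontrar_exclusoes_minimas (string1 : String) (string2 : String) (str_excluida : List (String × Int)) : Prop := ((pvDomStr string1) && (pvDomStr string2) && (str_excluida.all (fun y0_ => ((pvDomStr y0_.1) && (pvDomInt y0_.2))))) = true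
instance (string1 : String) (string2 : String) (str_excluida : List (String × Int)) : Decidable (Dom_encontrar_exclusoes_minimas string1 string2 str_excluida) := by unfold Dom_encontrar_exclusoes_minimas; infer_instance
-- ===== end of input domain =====

-- B replaces A's build-a-string-then-re-histogram pipeline by one arithmetic pass over the
-- union of histogram keys (objective: simpler). Like A, the Python B mutates str_excluida in
-- place; the equivalence proved here is about the returned 5-tuple (which contains it).

-- ===== PORT A =====
-- Python `char * n` where char is a one-character dict key: the string repeated n times
-- (empty for n ≤ 0), rendered as the list of its characters.
def pvStrMul (k : String) (n : Int) : List Char :=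
  (List.replicate n.toNat k).flatMap String.toList

def construir_histograma_excluir (s : List Char) : PySem.Dict String Int :=
  s.foldl (fun h c =>
    if h.contains (String.singleton c) then
      -- histograma[char] += 1  (the key is present, so getD with default 0 is its value)
      h.insert (String.singleton c) (h.getD (String.singleton c) 0 + 1)
    else
      h.insert (String.singleton c) 1) PySem.Dict.empty

def encontrar_exclusoes_minimas (string1 : String) (string2 : String) (str_excluida : List (String × Int)) : Int × (List (String × Int)) × (List (String × Int)) × (List (String × Int)) × (List (String × Int)) :=
  let h1 := construir_histograma_excluir string1.toList
  let h2 := construir_histograma_excluir string2.toList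
  -- first loop, state (exclusoes_minimas, str_excluida, string_final)
  let st1 := h1.items.foldl (fun st kc =>
      if h2.contains kc.1 then
        if kc.2 ≠ h2.getD kc.1 0 then
          (st.1 + |kc.2 - h2.getD kc.1 0|,
           st.2.1.insert kc.1 (kc.2 - h2.getD kc.1 0),
           st.2.2 ++ pvStrMul kc.1 (min (h1.getD kc.1 0) (h2.getD kc.1 0)))
        else
          (st.1, st.2.1, st.2.2 ++ pvStrMul kc.1 |kc.2|)
      else
        (st.1 + kc.2, st.2.1.insert kc.1 kc.2, st.2.2))
    ((0 : Int), PySem.Dict.mk str_excluida, ([] : List Char))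
  -- second loop, state (exclusoes_minimas, str_excluida)
  let st2 := h2.items.foldl (fun st kc =>
      if !(h1.contains kc.1) then (st.1 + kc.2, st.2.insert kc.1 kc.2) else st)
    (st1.1, st1.2.1)
  let histograma_resultado := construir_histograma_excluir st1.2.2
  (st2.1, st2.2.items, h1.items, h2.items, histograma_resultado.items)

-- ===== PORT B =====
def pvHistograma (s : List Char) : PySem.Dict String Int :=
  s.foldl (fun h c => h.insert (String.singleton c) (h.getD (String.singleton c) 0 + 1))
    PySem.Dict.empty

def encontrar_exclusoes_minimas_alt (string1 : String) (string2 : String) (str_excluida : List (String × Int)) : Int × (List (String × Int)) × (List (String × Int)) × (List (String × Int)) × (List (String × Int)) :=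
  let h1 := pvHistograma string1.toList
  let h2 := pvHistograma string2.toList
  -- one pass over the union of the keys, state (exclusoes_minimas, str_excluida, histograma_resultado)
  let st := (h1.keys ++ h2.keys.filter (fun c => !(h1.contains c))).foldl (fun st char =>
      let c1 := h1.getD char 0
      let c2 := h2.getD char 0
      if c1 ≠ 0 ∧ c2 ≠ 0 then
        (st.1 + |c1 - c2|,
         if c1 ≠ c2 then st.2.1.insert char (c1 - c2) else st.2.1,
         st.2.2.insert char (min c1 c2))
      else
        (st.1 + |c1 - c2|, st.2.1.insert char (c1 + c2), st.2.2))
    ((0 : Int), PySem.Dict.mk str_excluida, (PySem.Dict.empty : PySem.Dict String Int))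
  (st.1, st.2.1.items, h1.items, h2.items, st.2.2.items)

-- ===== PRECONDITION & SPEC =====
def Spec_encontrar_exclusoes_minimas (string1 : String) (string2 : String) (str_excluida : List (String × Int)) (out : Int × (List (String × Int)) × (List (String × Int)) × (List (String × Int)) × (List (String × Int))) : Prop := out = encontrar_exclusoes_minimas_alt string1 string2 str_excluida
instance (string1 : String) (string2 : String) (str_excluida : List (String × Int)) (out : Int × (List (String × Int)) × (List (String × Int)) × (List (String × Int)) × (List (String × Int))) : Decidable (Spec_encontrar_exclusoes_minimas string1 string2 str_excluida out) := by unfold Spec_encontrar_exclusoes_minimas; infer_instance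

-- ===== CLAIM (what is proved, stated in full; the proofs are below) =====
def Claim_equal_encontrar_exclusoes_minimas : Prop := ∀ (string1 : String) (string2 : String) (str_excluida : List (String × Int)), Dom_encontrar_exclusoes_minimas string1 string2 str_excluida → Spec_encontrar_exclusoes_minimas string1 string2 str_excluida (encontrar_exclusoes_minimas string1 string2 str_excluida)

-- ===== LEMMAS AND PROOFS =====
theorem pvHistograma_eq_counter (s : List Char) :
    pvHistograma s = PySem.Dict.counter (s.map String.singleton) := by
  rw [← PySem.Dict.foldl_insert_getD_add_one_eq_counter, List.foldl_map]; rfl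

theorem construir_eq_counter (s : List Char) :
    construir_histograma_excluir s = PySem.Dict.counter (s.map String.singleton) := by
  have h : construir_histograma_excluir s = pvHistograma s := by
    unfold construir_histograma_excluir pvHistograma
    apply PySem.List.foldl_congr_mem
    intro acc c _
    by_cases hc : acc.contains (String.singleton c) = true
    · simp [hc]
    · simp only [Bool.not_eq_true] at hc
      simp [hc, PySem.Dict.getD_of_not_contains _ _ hc]
  rw [h, pvHistograma_eq_counter]

-- step functions (A loop 1, componentwise)
def pvFA (l1 l2 : List String) (x : Int) (y : String) : Int :=
  if l2.contains y = true then
    if (List.count y l1 : Int) ≠ (List.count y l2 : Int) then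
      x + |(List.count y l1 : Int) - (List.count y l2 : Int)|
    else x
  else x + (List.count y l1 : Int)

def pvGA (l1 l2 : List String) (d : PySem.Dict String Int) (y : String) : PySem.Dict String Int :=
  if l2.contains y = true then
    if (List.count y l1 : Int) ≠ (List.count y l2 : Int) then
      d.insert y ((List.count y l1 : Int) - (List.count y l2 : Int))
    else d
  else d.insert y (List.count y l1 : Int)

def pvHA (l1 l2 : List String) (sf : List Char) (y : String) : List Char :=
  if l2.contains y = true then
    if (List.count y l1 : Int) ≠ (List.count y l2 : Int) then
      sf ++ pvStrMul y (min (List.count y l1 : Int) (List.count y l2 : Int))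
    else sf ++ pvStrMul y |(List.count y l1 : Int)|
  else sf

-- step functions (A loop 2, componentwise)
def pvF2 (l1 l2 : List String) (x : Int) (y : String) : Int :=
  if (!l1.contains y) = true then x + (List.count y l2 : Int) else x

def pvG2 (l1 l2 : List String) (d : PySem.Dict String Int) (y : String) : PySem.Dict String Int :=
  if (!l1.contains y) = true then d.insert y (List.count y l2 : Int) else d

-- step functions (B, componentwise)
def pvFB (l1 l2 : List String) (x : Int) (y : String) : Int :=
  x + |(List.count y l1 : Int) - (List.count y l2 : Int)|

def pvGB (l1 l2 : List String) (d : PySem.Dict String Int) (y : String) : PySem.Dict String Int :=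
  if (List.count y l1 : Int) ≠ 0 ∧ (List.count y l2 : Int) ≠ 0 then
    if (List.count y l1 : Int) ≠ (List.count y l2 : Int) then
      d.insert y ((List.count y l1 : Int) - (List.count y l2 : Int))
    else d
  else d.insert y ((List.count y l1 : Int) + (List.count y l2 : Int))

def pvRB (l1 l2 : List String) (r : PySem.Dict String Int) (y : String) : PySem.Dict String Int :=
  if (List.count y l1 : Int) ≠ 0 ∧ (List.count y l2 : Int) ≠ 0 then
    r.insert y (min (List.count y l1 : Int) (List.count y l2 : Int))
  else r

def pvMI (l1 l2 : List String) (y : String) : Int :=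
  if l2.contains y = true then min (List.count y l1 : Int) (List.count y l2 : Int) else 0

theorem pvSplitA (l1 l2 : List String) :
    (fun (x : Int × PySem.Dict String Int × List Char) (y : String) =>
      if l2.contains y = true then
        if (List.count y l1 : Int) ≠ (List.count y l2 : Int) then
          (x.1 + |(List.count y l1 : Int) - (List.count y l2 : Int)|,
           x.2.1.insert y ((List.count y l1 : Int) - (List.count y l2 : Int)),
           x.2.2 ++ pvStrMul y (min (List.count y l1 : Int) (List.count y l2 : Int)))
        else (x.1, x.2.1, x.2.2 ++ pvStrMul y |(List.count y l1 : Int)|)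
      else (x.1 + (List.count y l1 : Int), x.2.1.insert y (List.count y l1 : Int), x.2.2)) =
    fun x y => (pvFA l1 l2 x.1 y, pvGA l1 l2 x.2.1 y, pvHA l1 l2 x.2.2 y) := by
  funext x y
  unfold pvFA pvGA pvHA
  split_ifs <;> rfl

theorem pvSplit2 (l1 l2 : List String) :
    (fun (x : Int × PySem.Dict String Int) (y : String) =>
      if (!l1.contains y) = true then
        (x.1 + (List.count y l2 : Int), x.2.insert y (List.count y l2 : Int))
      else x) =
    fun x y => (pvF2 l1 l2 x.1 y, pvG2 l1 l2 x.2 y) := by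
  funext x y
  unfold pvF2 pvG2
  split_ifs <;> rfl

theorem pvSplitB (l1 l2 : List String) :
    (fun (x : Int × PySem.Dict String Int × PySem.Dict String Int) (y : String) =>
      if (List.count y l1 : Int) ≠ 0 ∧ (List.count y l2 : Int) ≠ 0 then
        (x.1 + |(List.count y l1 : Int) - (List.count y l2 : Int)|,
         if (List.count y l1 : Int) ≠ (List.count y l2 : Int) then
           x.2.1.insert y ((List.count y l1 : Int) - (List.count y l2 : Int))
         else x.2.1,
         x.2.2.insert y (min (List.count y l1 : Int) (List.count y l2 : Int)))
      else
        (x.1 + |(List.count y l1 : Int) - (List.count y l2 : Int)|,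
         x.2.1.insert y ((List.count y l1 : Int) + (List.count y l2 : Int)),
         x.2.2)) =
    fun x y => (pvFB l1 l2 x.1 y, pvGB l1 l2 x.2.1 y, pvRB l1 l2 x.2.2 y) := by
  funext x y
  unfold pvFB pvGB pvRB
  split_ifs <;> rfl

theorem pvE (l1 l2 : List String) :
    (PySem.Set.ofList l2).foldl (pvF2 l1 l2)
      ((PySem.Set.ofList l1).foldl (pvFA l1 l2) 0) =
    (PySem.Set.ofList l1 ++ (PySem.Set.ofList l2).filter (fun c => !l1.contains c)).foldl
      (pvFB l1 l2) 0 := by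
  rw [List.foldl_append, List.foldl_filter]
  have h1 : (PySem.Set.ofList l1).foldl (pvFA l1 l2) 0 =
      (PySem.Set.ofList l1).foldl (pvFB l1 l2) 0 := by
    apply PySem.List.foldl_congr_mem
    intro acc y hy
    have hy1 : y ∈ l1 := (PySem.Set.mem_ofList l1 y).mp hy
    have hc1 : 0 < List.count y l1 := List.count_pos_iff.mpr hy1
    unfold pvFA pvFB
    by_cases h2 : l2.contains y = true
    · simp only [h2, if_true]
      by_cases hne : (List.count y l1 : Int) ≠ (List.count y l2 : Int)
      · simp [hne]
      · rw [not_not] at hne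
        simp [hne]
    · have hm : y ∉ l2 := fun h => h2 (List.contains_iff_mem.mpr h)
      have hz : List.count y l2 = 0 := List.count_eq_zero.mpr hm
      simp [hz, abs_of_nonneg (show (0:Int) ≤ (List.count y l1 : Int) by positivity)]
  rw [h1]
  apply PySem.List.foldl_congr_mem
  intro acc y hy
  have hy2 : y ∈ l2 := (PySem.Set.mem_ofList l2 y).mp hy
  unfold pvF2 pvFB
  by_cases h1m : l1.contains y = true
  · have hm : y ∈ l1 := List.contains_iff_mem.mp h1m
    simp [hm]
  · have hm : y ∉ l1 := fun h => h1m (List.contains_iff_mem.mpr h)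
    have hz : List.count y l1 = 0 := List.count_eq_zero.mpr hm
    simp [hz, abs_of_nonneg (show (0:Int) ≤ (List.count y l2 : Int) by positivity)]

theorem pvD (l1 l2 : List String) (d0 : PySem.Dict String Int) :
    (PySem.Set.ofList l2).foldl (pvG2 l1 l2)
      ((PySem.Set.ofList l1).foldl (pvGA l1 l2) d0) =
    (PySem.Set.ofList l1 ++ (PySem.Set.ofList l2).filter (fun c => !l1.contains c)).foldl
      (pvGB l1 l2) d0 := by
  rw [List.foldl_append, List.foldl_filter]
  have h1 : (PySem.Set.ofList l1).foldl (pvGA l1 l2) d0 =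
      (PySem.Set.ofList l1).foldl (pvGB l1 l2) d0 := by
    apply PySem.List.foldl_congr_mem
    intro acc y hy
    have hy1 : y ∈ l1 := (PySem.Set.mem_ofList l1 y).mp hy
    have hc1 : 0 < List.count y l1 := List.count_pos_iff.mpr hy1
    unfold pvGA pvGB
    by_cases h2 : l2.contains y = true
    · have hy2 : y ∈ l2 := List.contains_iff_mem.mp h2
      have hc2 : 0 < List.count y l2 := List.count_pos_iff.mpr hy2
      simp [hy2, hc1.ne', hc2.ne']
    · have hm : y ∉ l2 := fun h => h2 (List.contains_iff_mem.mpr h)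
      have hz : List.count y l2 = 0 := List.count_eq_zero.mpr hm
      simp [hz, hm]
  rw [h1]
  apply PySem.List.foldl_congr_mem
  intro acc y hy
  have hy2 : y ∈ l2 := (PySem.Set.mem_ofList l2 y).mp hy
  have hc2 : 0 < List.count y l2 := List.count_pos_iff.mpr hy2
  unfold pvG2 pvGB
  by_cases h1m : l1.contains y = true
  · have hm : y ∈ l1 := List.contains_iff_mem.mp h1m
    have hc1 : 0 < List.count y l1 := List.count_pos_iff.mpr hm
    simp [hm]
  · have hm : y ∉ l1 := fun h => h1m (List.contains_iff_mem.mpr h)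
    have hz : List.count y l1 = 0 := List.count_eq_zero.mpr hm
    simp [hz, hm]

theorem pvFoldl_modify_replicate (n : Nat) (k : String) (d : PySem.Dict String Int) :
    (List.replicate n k).foldl (fun d x => d.modify x 0 (· + 1)) d =
      if n = 0 then d else d.insert k (d.getD k 0 + n) := by
  induction n generalizing d with
  | zero => simp
  | succ n ih =>
    rw [List.replicate_succ, List.foldl_cons, ih]
    by_cases hn : n = 0
    · subst hn; simp [PySem.Dict.modify]
    · simp only [hn, if_false, Nat.succ_ne_zero, PySem.Dict.modify,
        PySem.Dict.getD_insert_self, PySem.Dict.insert_insert_self]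
      congr 1
      push_cast
      ring

theorem pvFoldl_modify_flatMap_rep (ks : List String) (m : String → Nat)
    (d : PySem.Dict String Int) (hnd : ks.Nodup)
    (hfresh : ∀ k ∈ ks, d.contains k = false) :
    ((ks.flatMap fun k => List.replicate (m k) k).foldl
        (fun d x => d.modify x 0 (· + 1)) d) =
      ks.foldl (fun d k => if m k = 0 then d else d.insert k ((m k : Int))) d := by
  induction ks generalizing d with
  | nil => simp
  | cons k ks ih =>
    rw [List.flatMap_cons, List.foldl_append, List.foldl_cons, pvFoldl_modify_replicate]
    have hk : d.contains k = false := hfresh k (by simp)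
    rw [PySem.Dict.getD_of_not_contains d 0 hk]
    have hnd' : ks.Nodup := hnd.of_cons
    have hknot : k ∉ ks := (List.nodup_cons.mp hnd).1
    by_cases hm : m k = 0
    · simp only [hm, if_true]
      exact ih d hnd' (fun x hx => hfresh x (by simp [hx]))
    · simp only [hm, if_false, zero_add]
      exact ih _ hnd' (fun x hx => by
        rw [PySem.Dict.contains_insert]
        have : x ≠ k := fun h => hknot (h ▸ hx)
        simp [this, hfresh x (by simp [hx])])

theorem pvStrMul_map_singleton (c : Char) (n : Int) :
    (pvStrMul (String.singleton c) n).map String.singleton =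
      List.replicate n.toNat (String.singleton c) := by
  unfold pvStrMul
  induction n.toNat with
  | zero => simp
  | succ m ih => rw [List.replicate_succ, List.flatMap_cons, List.map_append, ih]
                 simp [String.toList_singleton]

theorem pvR (l1 l2 : List String) (hsing : ∀ k ∈ l1, ∃ c, k = String.singleton c) :
    PySem.Dict.counter (((PySem.Set.ofList l1).foldl (pvHA l1 l2) []).map String.singleton) =
    (PySem.Set.ofList l1 ++ (PySem.Set.ofList l2).filter (fun c => !l1.contains c)).foldl
      (pvRB l1 l2) PySem.Dict.empty := by
  -- 1: normalise the string_final blocks to pvStrMul with a single exponent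
  have h1 : (PySem.Set.ofList l1).foldl (pvHA l1 l2) [] =
      (PySem.Set.ofList l1).foldl (fun sf k => sf ++ pvStrMul k (pvMI l1 l2 k)) [] := by
    apply PySem.List.foldl_congr_mem
    intro acc y hy
    have hy1 : y ∈ l1 := (PySem.Set.mem_ofList l1 y).mp hy
    have hc1 : 0 < List.count y l1 := List.count_pos_iff.mpr hy1
    unfold pvHA pvMI
    by_cases h2 : l2.contains y = true
    · simp only [h2, if_true]
      by_cases hne : (List.count y l1 : Int) ≠ (List.count y l2 : Int)
      · simp [hne]
      · rw [not_not] at hne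
        rw [hne]
        simp [abs_of_nonneg (show (0:Int) ≤ (List.count y l2 : Int) by positivity)]
    · have hm : y ∉ l2 := fun h => h2 (List.contains_iff_mem.mpr h)
      simp [hm, pvStrMul]
  rw [h1, PySem.List.foldl_append_eq_flatMap, List.nil_append, List.map_flatMap]
  -- 2: each block maps to a replicate block over the key itself
  have h2 : (PySem.Set.ofList l1).flatMap
        (fun k => (pvStrMul k (pvMI l1 l2 k)).map String.singleton) =
      (PySem.Set.ofList l1).flatMap
        (fun k => List.replicate (pvMI l1 l2 k).toNat k) := by
    apply List.flatMap_congr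
    intro k hk
    obtain ⟨c, rfl⟩ := hsing k ((PySem.Set.mem_ofList l1 k).mp hk)
    exact pvStrMul_map_singleton c (pvMI l1 l2 (String.singleton c))
  rw [h2, PySem.Dict.counter_eq_foldl,
    pvFoldl_modify_flatMap_rep _ _ _ (PySem.Set.nodup_ofList l1) (fun k _ => by simp)]
  -- 3: match with B's single pass: the filtered tail inserts nothing into the result
  rw [List.foldl_append, List.foldl_filter]
  have h3 : ∀ (acc : PySem.Dict String Int), ∀ y ∈ PySem.Set.ofList l2,
      (if (!l1.contains y) = true then pvRB l1 l2 acc y else acc) = acc := by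
    intro acc y _
    by_cases h1m : l1.contains y = true
    · have hm : y ∈ l1 := List.contains_iff_mem.mp h1m
      simp [hm]
    · have hm : y ∉ l1 := fun h => h1m (List.contains_iff_mem.mpr h)
      have hz : List.count y l1 = 0 := List.count_eq_zero.mpr hm
      simp [pvRB, hz]
  rw [PySem.List.foldl_congr_mem _ _ (fun acc _ => acc) _ h3, List.foldl_fixed]
  -- 4: the two passes over l1's distinct keys agree pointwise
  apply PySem.List.foldl_congr_mem
  intro acc y hy
  have hy1 : y ∈ l1 := (PySem.Set.mem_ofList l1 y).mp hy
  have hc1 : 0 < List.count y l1 := List.count_pos_iff.mpr hy1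
  unfold pvMI pvRB
  by_cases h2 : l2.contains y = true
  · have hy2 : y ∈ l2 := List.contains_iff_mem.mp h2
    have hc2 : 0 < List.count y l2 := List.count_pos_iff.mpr hy2
    have hmin : (0:Int) < min (List.count y l1 : Int) (List.count y l2 : Int) := by
      simp only [lt_min_iff]
      constructor <;> (simp only [Nat.cast_pos]; omega)
    have htn : (min (List.count y l1 : Int) (List.count y l2 : Int)).toNat ≠ 0 := by omega
    have hcast : ((min (List.count y l1 : Int) (List.count y l2 : Int)).toNat : Int) =
        min (List.count y l1 : Int) (List.count y l2 : Int) := Int.toNat_of_nonneg hmin.le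
    rw [if_pos h2, if_neg htn, hcast,
      if_pos (show (List.count y l1 : Int) ≠ 0 ∧ (List.count y l2 : Int) ≠ 0 from
        ⟨by exact_mod_cast hc1.ne', by exact_mod_cast hc2.ne'⟩)]
  · have hm : y ∉ l2 := fun h => h2 (List.contains_iff_mem.mpr h)
    have hz : List.count y l2 = 0 := List.count_eq_zero.mpr hm
    simp [hz]

theorem pvFoldl_prod3 {β σ₁ σ₂ σ₃ : Type} (f : σ₁ → β → σ₁) (g : σ₂ → β → σ₂)
    (h : σ₃ → β → σ₃) (l : List β) (a : σ₁) (b : σ₂) (c : σ₃) :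
    l.foldl (fun s e => (f s.1 e, g s.2.1 e, h s.2.2 e)) (a, b, c) =
      (l.foldl f a, l.foldl g b, l.foldl h c) := by
  exact (PySem.List.foldl_prod_mk f (fun (p : σ₂ × σ₃) e => (g p.1 e, h p.2 e)) l a (b, c)).trans
    (by rw [PySem.List.foldl_prod_mk])

theorem pvR' (l1 l2 : List String) (hsing : ∀ k ∈ l1, ∃ c, k = String.singleton c) :
    (PySem.Set.ofList (((PySem.Set.ofList l1).foldl (pvHA l1 l2) []).map String.singleton)).map
      (fun k =>
        (k, (List.count k (((PySem.Set.ofList l1).foldl (pvHA l1 l2) []).map String.singleton) : Int))) =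
    ((PySem.Set.ofList l1 ++ (PySem.Set.ofList l2).filter (fun c => !l1.contains c)).foldl
      (pvRB l1 l2) PySem.Dict.empty).items := by
  rw [← PySem.Dict.items_counter]
  exact congrArg PySem.Dict.items (pvR l1 l2 hsing)

-- ===== VERDICT (by name: the statement is the Claim_ definition above) =====
theorem encontrar_exclusoes_minimas_spec : Claim_equal_encontrar_exclusoes_minimas := by
  intro s1 s2 se _
  unfold Spec_encontrar_exclusoes_minimas
  unfold encontrar_exclusoes_minimas encontrar_exclusoes_minimas_alt
  simp only [construir_eq_counter, pvHistograma_eq_counter, PySem.Dict.items_counter,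
    PySem.Dict.keys_counter, PySem.Dict.getD_counter, PySem.Dict.contains_counter,
    List.foldl_map]
  rw [pvSplitA, pvSplitB, pvSplit2, pvFoldl_prod3, pvFoldl_prod3, PySem.List.foldl_prod_mk]
  have hsing : ∀ k ∈ List.map String.singleton s1.toList, ∃ c, k = String.singleton c := by
    intro k hk
    rcases List.mem_map.mp hk with ⟨c, _, rfl⟩
    exact ⟨c, rfl⟩
  rw [pvE, pvD, pvR' _ _ hsing]
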